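-- pv_equiv track=rewrite | github.com/deepakkt/bits-aiml-mlops-assignment-2 | src/cats_dogs/data.py | _infer_label_from_parts
-- ===== SOURCE A (Python) =====
-- from typing import Iterable
--
-- def _infer_label_from_parts(parts: Iterable[str]) -> str | None:
--     for part in reversed(list(parts)):
--         lower = part.lower()
--         if lower in {"cat", "cats"}:
--             return "cat"
--         if lower in {"dog", "dogs"}:
--             return "dog"
--     return None
-- ===== SOURCE B (Python) =====
-- _CAT = ("cat", "cats")
-- _DOG = ("dog", "dogs")
--
-- def _infer_label_from_parts(parts):
--     lowered = [p.lower() for p in parts]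
--     cat_i = max((i for i, p in enumerate(lowered) if p in _CAT), default=-1)
--     dog_i = max((i for i, p in enumerate(lowered) if p in _DOG), default=-1)
--     if cat_i == dog_i:          # both -1: no keyword anywhere
--         return None
--     return "cat" if cat_i > dog_i else "dog"
-- ===== Notes on version B (the rewrite author's own statement) =====
-- stated objective: alternative
-- what changed: Instead of scanning in reverse for the first keyword, B runs two staged passes computing the last index of a cat-keyword and the last index of a dog-keyword, then decides the label by comparing the two indices (equal only when both are -1, i.e. no keyword).
import Mathlib
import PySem

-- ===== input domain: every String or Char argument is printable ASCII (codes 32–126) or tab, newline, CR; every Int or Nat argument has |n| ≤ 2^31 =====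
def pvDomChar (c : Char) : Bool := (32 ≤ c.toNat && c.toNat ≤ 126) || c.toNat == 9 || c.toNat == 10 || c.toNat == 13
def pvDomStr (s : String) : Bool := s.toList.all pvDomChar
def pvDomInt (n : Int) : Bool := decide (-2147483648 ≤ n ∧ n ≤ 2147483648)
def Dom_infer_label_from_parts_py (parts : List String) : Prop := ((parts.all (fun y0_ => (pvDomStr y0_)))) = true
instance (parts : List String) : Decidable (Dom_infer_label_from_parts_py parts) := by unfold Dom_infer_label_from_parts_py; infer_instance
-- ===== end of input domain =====

-- B replaces A's reverse first-keyword scan by two staged passes: the last index of a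
-- cat-keyword and the last index of a dog-keyword, decided by comparing the two indices
-- (objective: alternative decomposition, same cost).

-- ===== PORT A =====
-- the 'for part in reversed(list(parts)): … return …' loop, step for step
def pvALoop : List String → Option String
  | [] => none
  | part :: rest =>
    let lower := PySem.Str.lower part
    if lower = "cat" ∨ lower = "cats" then some "cat"
    else if lower = "dog" ∨ lower = "dogs" then some "dog"
    else pvALoop rest

def infer_label_from_parts_py (parts : List String) : Option String :=
  pvALoop parts.reverse

-- ===== PORT B =====
-- max((i for i, p in enumerate(lowered) if p in keys), default=-1)
def pvLastIdx (keys : List String) (lowered : List String) : Int :=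
  match PySem.List.max?
      (((PySem.List.enumerate lowered).filter (fun ip => keys.contains ip.2)).map
        (fun ip => ip.1)) (fun i => i) with
  | some i => i
  | none => -1

def infer_label_from_parts_py_alt (parts : List String) : Option String :=
  let lowered := parts.map PySem.Str.lower
  let cat_i := pvLastIdx ["cat", "cats"] lowered
  let dog_i := pvLastIdx ["dog", "dogs"] lowered
  if cat_i = dog_i then none
  else if cat_i > dog_i then some "cat" else some "dog"

-- ===== PRECONDITION & SPEC =====
def Spec_infer_label_from_parts_py (parts : List String) (out : Option String) : Prop := out = infer_label_from_parts_py_alt parts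
instance (parts : List String) (out : Option String) : Decidable (Spec_infer_label_from_parts_py parts out) := by unfold Spec_infer_label_from_parts_py; infer_instance

-- ===== CLAIM =====
def Claim_equal_infer_label_from_parts_py : Prop := ∀ (parts : List String), Dom_infer_label_from_parts_py parts → Spec_infer_label_from_parts_py parts (infer_label_from_parts_py parts)

-- ===== LEMMAS AND PROOFS =====
lemma pvFoldlMax_lt {xs : List Int} {x L : Int} (hx : x < L) (h : ∀ y ∈ xs, y < L) :
    xs.foldl max x < L := by
  induction xs generalizing x with
  | nil => simpa using hx
  | cons a t ih =>
    simp only [List.foldl_cons]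
    exact ih (max_lt hx (h a (List.mem_cons_self))) (fun y hy => h y (List.mem_cons_of_mem _ hy))

lemma pvMax?_append_gt (xs : List Int) (L : Int) (h : ∀ x ∈ xs, x < L) :
    PySem.List.max? (xs ++ [L]) (fun i => i) = some L := by
  cases xs with
  | nil => simp [PySem.List.max?_id_cons]
  | cons x t =>
    rw [List.cons_append, PySem.List.max?_id_cons, List.foldl_append]
    have hfold : t.foldl max x < L :=
      pvFoldlMax_lt (h x (List.mem_cons_self)) (fun y hy => h y (List.mem_cons_of_mem _ hy))
    simp [max_eq_right hfold.le]

-- every index produced by a filtered enumeration is below the list length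
lemma pvIdx_lt_length (pred : Int × String → Bool) (lowered : List String) (i : Int)
    (hi : i ∈ ((PySem.List.enumerate lowered).filter pred).map (fun ip => ip.1)) :
    i < (lowered.length : Int) := by
  rcases List.mem_map.1 hi with ⟨ip, hip, rfl⟩
  have hmem := List.mem_of_mem_filter hip
  rcases (PySem.List.mem_enumerate_iff lowered 0 ip).1 hmem with ⟨k, hk, rfl⟩
  simp
  omega

lemma pvLastIdx_lt (keys lowered : List String) :
    pvLastIdx keys lowered < (lowered.length : Int) := by
  unfold pvLastIdx
  cases hm : PySem.List.max?
      (((PySem.List.enumerate lowered).filter (fun ip => keys.contains ip.2)).map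
        (fun ip => ip.1)) (fun i => i) with
  | none => simp; omega
  | some m => exact pvIdx_lt_length _ lowered m (PySem.List.max?_mem hm)

lemma pvLastIdx_append (keys lowered : List String) (q : String) :
    pvLastIdx keys (lowered ++ [q]) =
      if keys.contains q then (lowered.length : Int) else pvLastIdx keys lowered := by
  unfold pvLastIdx
  rw [PySem.List.enumerate_append, List.filter_append, List.map_append]
  have henum : PySem.List.enumerate [q] (0 + (lowered.length : Int)) =
      [((0 : Int) + (lowered.length : Int), q)] := by
    rw [PySem.List.enumerate_cons, PySem.List.enumerate_nil]
  by_cases hq : keys.contains q = true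
  · have hsing : ((PySem.List.enumerate [q] (0 + (lowered.length : Int))).filter
        (fun ip => keys.contains ip.2)).map (fun ip => ip.1) = [(lowered.length : Int)] := by
      have hq' : q ∈ keys := by simpa using hq
      rw [henum, List.filter_singleton]
      simp [hq']
    rw [hsing, pvMax?_append_gt _ _ (fun x hx => pvIdx_lt_length _ lowered x hx), if_pos hq]
  · have hnil : ((PySem.List.enumerate [q] (0 + (lowered.length : Int))).filter
        (fun ip => keys.contains ip.2)).map (fun ip => ip.1) = [] := by
      have hq' : q ∉ keys := by simpa using hq
      rw [henum, List.filter_singleton]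
      simp [hq']
    rw [hnil, List.append_nil, if_neg hq]

lemma pvMain (parts : List String) :
    infer_label_from_parts_py parts = infer_label_from_parts_py_alt parts := by
  induction parts using List.reverseRecOn with
  | nil => decide
  | append_singleton xs p ih =>
    have hlow : (xs ++ [p]).map PySem.Str.lower = xs.map PySem.Str.lower ++ [PySem.Str.lower p] := by
      simp
    have hlen : ((xs.map PySem.Str.lower).length : Int) = (xs.length : Int) := by simp
    have hc := pvLastIdx_lt ["cat", "cats"] (xs.map PySem.Str.lower)
    have hd := pvLastIdx_lt ["dog", "dogs"] (xs.map PySem.Str.lower)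
    have hA : infer_label_from_parts_py (xs ++ [p]) =
        (let lower := PySem.Str.lower p
         if lower = "cat" ∨ lower = "cats" then some "cat"
         else if lower = "dog" ∨ lower = "dogs" then some "dog"
         else infer_label_from_parts_py xs) := by
      simp only [infer_label_from_parts_py, List.reverse_append, List.reverse_singleton,
        List.singleton_append, pvALoop]
    rw [hA]
    simp only [infer_label_from_parts_py_alt, hlow, pvLastIdx_append]
    by_cases h1 : PySem.Str.lower p = "cat" ∨ PySem.Str.lower p = "cats"
    · have hcat : (["cat", "cats"].contains (PySem.Str.lower p)) = true := by
        rcases h1 with h | h <;> simp [h]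
      have hdog : (["dog", "dogs"].contains (PySem.Str.lower p)) = false := by
        rcases h1 with h | h <;> simp [h]
      simp only [h1, if_true, hcat, hdog, Bool.false_eq_true, if_false]
      rw [if_neg (by omega), if_pos (by omega)]
    · by_cases h2 : PySem.Str.lower p = "dog" ∨ PySem.Str.lower p = "dogs"
      · have h1' : ¬PySem.Str.lower p = "cat" ∧ ¬PySem.Str.lower p = "cats" := by tauto
        have hcat : (["cat", "cats"].contains (PySem.Str.lower p)) = false := by
          simp [h1'.1, h1'.2]
        have hdog : (["dog", "dogs"].contains (PySem.Str.lower p)) = true := by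
          rcases h2 with h | h <;> simp [h]
        simp only [h1, if_false, h2, if_true, hcat, hdog, Bool.false_eq_true]
        rw [if_neg (by omega), if_neg (by omega)]
      · have h1' : ¬PySem.Str.lower p = "cat" ∧ ¬PySem.Str.lower p = "cats" := by tauto
        have h2' : ¬PySem.Str.lower p = "dog" ∧ ¬PySem.Str.lower p = "dogs" := by tauto
        have hcat : (["cat", "cats"].contains (PySem.Str.lower p)) = false := by
          simp [h1'.1, h1'.2]
        have hdog : (["dog", "dogs"].contains (PySem.Str.lower p)) = false := by
          simp [h2'.1, h2'.2]
        simp only [h1, if_false, h2, hcat, hdog, Bool.false_eq_true]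
        rw [ih]
        simp [infer_label_from_parts_py_alt]

-- ===== VERDICT =====
theorem infer_label_from_parts_py_spec : Claim_equal_infer_label_from_parts_py := by
  intro parts _
  unfold Spec_infer_label_from_parts_py
  exact pvMain parts
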